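-- pv_equiv track=rewrite | github.com/IES-Rafael-Alberti/dam1-2425-ejercicios-u2-dcsibon | PiramideSumas/piramideSumas3b.py | piramide_decreciente
-- ===== SOURCE A (Python) =====
-- def piramide_decreciente(num: int):
--     res = ""
--     while num >= 0:
--         cont = 1
--         total = 0
--         res += str(num) + " => 0 "
--         while cont <= num:
--             res += f"+ {cont} "
--             total += cont
--             cont += 1
--         if num != 0:
--             res += f"= {total}"
--         res += "\n"
--         num -= 1
--     return res
-- ===== SOURCE B (Python) =====
-- def piramide_decreciente(num: int):
--     if num < 0:
--         return ""
--     lines = ["0 => 0 \n"]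
--     buf = ""
--     total = 0
--     for k in range(1, num + 1):
--         buf += f"+ {k} "
--         total += k
--         lines.append(f"{k} => 0 {buf}= {total}\n")
--     return "".join(reversed(lines))
-- ===== Notes on version B (the rewrite author's own statement) =====
-- stated objective: faster
-- what changed: Replaces A's nested descending while-loops (which rebuild every row's terms and total from scratch and grow one string by repeated +=) with a single ascending pass that extends one running term-buffer and running total per row, collects the rows in a list and joins them reversed.
import Mathlib
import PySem

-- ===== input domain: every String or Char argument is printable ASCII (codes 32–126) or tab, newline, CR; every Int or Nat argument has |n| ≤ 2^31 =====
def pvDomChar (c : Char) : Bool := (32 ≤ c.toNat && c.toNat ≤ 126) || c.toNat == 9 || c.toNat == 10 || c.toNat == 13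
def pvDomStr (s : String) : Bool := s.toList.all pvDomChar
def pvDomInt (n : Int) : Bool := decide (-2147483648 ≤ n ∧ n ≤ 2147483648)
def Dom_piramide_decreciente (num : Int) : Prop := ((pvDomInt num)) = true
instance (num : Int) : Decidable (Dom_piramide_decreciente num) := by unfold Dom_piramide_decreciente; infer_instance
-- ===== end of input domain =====

-- B builds the rows in one ascending pass with a running term-buffer and running total and joins
-- them in reverse, instead of A's nested descending while-loops; same return value for every Int.

-- ===== PORT A =====
-- inner 'while cont <= num' loop of A: returns the extended res and the total
def pdInner (num cont total : Int) (res : String) : String × Int :=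
  if cont ≤ num then
    pdInner num (cont + 1) (total + cont) (res ++ ("+ " ++ PySem.Int.toStr cont ++ " "))
  else (res, total)
termination_by (num + 1 - cont).toNat
decreasing_by omega

-- outer 'while num >= 0' loop of A
def pdOuter (num : Int) (res : String) : String :=
  if num ≥ 0 then
    let p := pdInner num 1 0 (res ++ (PySem.Int.toStr num ++ " => 0 "))
    let res2 := if num ≠ 0 then p.1 ++ ("= " ++ PySem.Int.toStr p.2) else p.1
    pdOuter (num - 1) (res2 ++ "\n")
  else res
termination_by (num + 1).toNat
decreasing_by omega

def piramide_decreciente (num : Int) : String := pdOuter num ""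

-- ===== PORT B =====
-- one loop step of Source B's 'for k in range(1, num+1)': state = (buf, total, lines)
def pdStep (st : String × Int × List String) (k : Int) : String × Int × List String :=
  let buf := st.1 ++ ("+ " ++ PySem.Int.toStr k ++ " ")
  let total := st.2.1 + k
  (buf, total, st.2.2 ++ [PySem.Int.toStr k ++ " => 0 " ++ buf ++ "= " ++ PySem.Int.toStr total ++ "\n"])

def piramide_decreciente_alt (num : Int) : String :=
  if num < 0 then ""
  else
    let st := (PySem.List.pyRange 1 (num + 1) 1).foldl pdStep ("", 0, ["0 => 0 \n"])
    PySem.Str.join "" st.2.2.reverse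

-- ===== PRECONDITION & SPEC =====
def Spec_piramide_decreciente (num : Int) (out : String) : Prop := out = piramide_decreciente_alt num
instance (num : Int) (out : String) : Decidable (Spec_piramide_decreciente num out) := by unfold Spec_piramide_decreciente; infer_instance

-- ===== CLAIM (what is proved, stated in full; the proofs are below) =====
def Claim_equal_piramide_decreciente : Prop := ∀ (num : Int), Dom_piramide_decreciente num → Spec_piramide_decreciente num (piramide_decreciente num)

-- ===== LEMMAS AND PROOFS =====

-- term string "+ k "
def termStr (k : Int) : String := "+ " ++ PySem.Int.toStr k ++ " "

-- buffer built from count c with n further terms: "+ c " ++ "+ (c+1) " ++ … (n terms)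
def bufFrom (c : Int) : Nat → String
  | 0 => ""
  | n + 1 => termStr c ++ bufFrom (c + 1) n

def sumFrom (c : Int) : Nat → Int
  | 0 => 0
  | n + 1 => c + sumFrom (c + 1) n

-- row k of the pyramid
def lineStr : Nat → String
  | 0 => "0 => 0 \n"
  | n + 1 => PySem.Int.toStr (n + 1) ++ " => 0 " ++ bufFrom 1 (n + 1) ++ "= " ++ PySem.Int.toStr (sumFrom 1 (n + 1)) ++ "\n"

-- rows n, n-1, …, 0 concatenated (A's output for input n)
def pyr : Nat → String
  | 0 => lineStr 0
  | n + 1 => lineStr (n + 1) ++ pyr n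

-- rows 0, 1, …, n as a list (B's lines)
def ascList : Nat → List String
  | 0 => [lineStr 0]
  | n + 1 => ascList n ++ [lineStr (n + 1)]

theorem bufFrom_snoc (n : Nat) : ∀ c : Int, bufFrom c (n + 1) = bufFrom c n ++ termStr (c + n) := by
  induction n with
  | zero => intro c; simp [bufFrom]
  | succ m ih =>
      intro c
      show termStr c ++ bufFrom (c + 1) (m + 1) = (termStr c ++ bufFrom (c + 1) m) ++ termStr (c + (m + 1))
      rw [ih (c + 1), String.append_assoc,
        show (c + 1 + (m : Int)) = c + ((m + 1 : Nat) : Int) from by push_cast; ring]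
      push_cast
      rfl

theorem sumFrom_snoc (n : Nat) : ∀ c : Int, sumFrom c (n + 1) = sumFrom c n + (c + n) := by
  induction n with
  | zero => intro c; simp [sumFrom]
  | succ m ih =>
      intro c
      show c + sumFrom (c + 1) (m + 1) = (c + sumFrom (c + 1) m) + (c + (m + 1))
      rw [ih (c + 1)]
      ring

theorem pdInner_eq (n : Nat) : ∀ (c total : Int) (res : String),
    pdInner (c + n - 1) c total res = (res ++ bufFrom c n, total + sumFrom c n) := by
  induction n with
  | zero =>
      intro c total res
      rw [pdInner]
      simp [bufFrom, sumFrom]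
  | succ m ih =>
      intro c total res
      rw [pdInner, if_pos (by push_cast; omega)]
      rw [show (c + ((m + 1 : Nat) : Int) - 1) = (c + 1) + (m : Int) - 1 from by push_cast; ring,
        ih (c + 1) (total + c) (res ++ ("+ " ++ PySem.Int.toStr c ++ " "))]
      refine Prod.ext ?_ ?_
      · show res ++ ("+ " ++ PySem.Int.toStr c ++ " ") ++ bufFrom (c + 1) m = res ++ bufFrom c (m + 1)
        rw [String.append_assoc]
        rfl
      · show total + c + sumFrom (c + 1) m = total + sumFrom c (m + 1)
        simp [sumFrom]
        ring

theorem pdInner_full (n : Nat) (res : String) :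
    pdInner (n : Int) 1 0 res = (res ++ bufFrom 1 n, sumFrom 1 n) := by
  have h := pdInner_eq n 1 0 res
  have h1 : ((1 : Int) + n - 1) = (n : Int) := by omega
  rw [h1] at h
  simpa using h

theorem pdOuter_eq (n : Nat) : ∀ res : String, pdOuter (n : Int) res = res ++ pyr n := by
  induction n with
  | zero =>
      intro res
      rw [pdOuter, if_pos (by omega)]
      simp only [pdInner_full 0]
      rw [if_neg (by simp)]
      rw [pdOuter, if_neg (by omega)]
      simp only [bufFrom, pyr, lineStr, String.append_assoc]
      congr 1
  | succ m ih =>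
      intro res
      rw [pdOuter, if_pos (by push_cast; omega)]
      simp only [pdInner_full (m + 1)]
      rw [if_pos (by push_cast; omega)]
      have h1 : ((m : Int) + 1 - 1) = (m : Int) := by ring
      push_cast
      rw [h1, ih]
      show res ++ (PySem.Int.toStr (↑m + 1) ++ " => 0 ") ++ bufFrom 1 (m + 1) ++ ("= " ++ PySem.Int.toStr (sumFrom 1 (m + 1))) ++ "\n" ++ pyr m
        = res ++ pyr (m + 1)
      simp only [pyr, lineStr, String.append_assoc]

-- B's fold over range(1, n+1)
theorem foldl_pdStep (n : Nat) :
    (PySem.List.pyRange 1 ((n : Int) + 1) 1).foldl pdStep ("", 0, [lineStr 0]) =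
      (bufFrom 1 n, sumFrom 1 n, ascList n) := by
  induction n with
  | zero =>
      rw [PySem.List.pyRange_one_eq_nil (by omega)]
      simp [bufFrom, sumFrom, ascList]
  | succ m ih =>
      have hsplit : PySem.List.pyRange 1 ((m : Int) + 1 + 1) 1
          = PySem.List.pyRange 1 ((m : Int) + 1) 1 ++ [(m : Int) + 1] := by
        exact PySem.List.pyRange_one_succ_right (by omega)
      push_cast
      rw [hsplit, List.foldl_append, ih]
      show pdStep (bufFrom 1 m, sumFrom 1 m, ascList m) ((m : Int) + 1)
        = (bufFrom 1 (m + 1), sumFrom 1 (m + 1), ascList (m + 1))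
      unfold pdStep
      have hb : bufFrom 1 (m + 1) = bufFrom 1 m ++ termStr ((m : Int) + 1) := by
        rw [bufFrom_snoc, show ((1 : Int) + (m : Int)) = (m : Int) + 1 from by ring]
      have hs : sumFrom 1 (m + 1) = sumFrom 1 m + ((m : Int) + 1) := by
        rw [sumFrom_snoc]; ring
      refine Prod.ext ?_ (Prod.ext ?_ ?_)
      · simp [hb, termStr]
      · simp [hs]
      · show ascList m ++ [PySem.Int.toStr ((m:Int) + 1) ++ " => 0 " ++ (bufFrom 1 m ++ ("+ " ++ PySem.Int.toStr ((m:Int)+1) ++ " ")) ++ "= " ++ PySem.Int.toStr (sumFrom 1 m + ((m:Int)+1)) ++ "\n"]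
          = ascList (m + 1)
        show _ = ascList m ++ [lineStr (m + 1)]
        congr 1
        simp only [lineStr, hb, termStr, String.append_assoc]
        rw [← hs]

theorem join_empty_cons (l : String) (ls : List String) :
    PySem.Str.join "" (l :: ls) = l ++ PySem.Str.join "" ls := by
  cases ls with
  | nil => simp [PySem.Str.join, PySem.Chars.join_singleton]
  | cons q rest =>
      show PySem.Str.join "" (l :: q :: rest) = l ++ PySem.Str.join "" (q :: rest)
      simp [PySem.Str.join, PySem.Chars.join_cons_cons]

theorem join_ascList_reverse (n : Nat) : PySem.Str.join "" (ascList n).reverse = pyr n := by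
  induction n with
  | zero => decide
  | succ m ih =>
      show PySem.Str.join "" (ascList m ++ [lineStr (m + 1)]).reverse = pyr (m + 1)
      rw [List.reverse_append, List.reverse_singleton, List.singleton_append, join_empty_cons, ih]
      rfl

-- ===== VERDICT (by name: the statement is the Claim_ definition above) =====
theorem piramide_decreciente_spec : Claim_equal_piramide_decreciente := by
  intro num _
  unfold Spec_piramide_decreciente piramide_decreciente piramide_decreciente_alt
  by_cases h : num < 0
  · rw [if_pos h, pdOuter, if_neg (by omega)]
  · rw [if_neg h]
    obtain ⟨n, rfl⟩ : ∃ n : Nat, num = (n : Int) := ⟨num.toNat, by omega⟩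
    have h0 : lineStr 0 = "0 => 0 \n" := rfl
    rw [← h0]
    simp only [foldl_pdStep n]
    rw [pdOuter_eq n ""]
    rw [join_ascList_reverse n]
    exact (by simp : ("" : String) ++ pyr n = pyr n).symm
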